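-- pv_equiv track=rewrite | github.com/taytzehao/School_scheduling | venv/Scripts/Heuristics.py | list_element_index
-- ===== SOURCE A (Python) =====
-- def list_element_index(lis,value,consecutive_number):
--     index=[]
--     for x_axis, day in enumerate(lis):
--         for y_axis,period in enumerate(day):
--             if y_axis<=len(day)-consecutive_number:
--                 if lis[x_axis][y_axis:y_axis+consecutive_number]==[value]*consecutive_number:
--                     index.append([x_axis,y_axis])
--     return index
-- ===== SOURCE B (Python) =====
-- def list_element_index(lis, value, consecutive_number):
--     # Single pass per row: track the length of the current run of `value`;
--     # whenever the run reaches `consecutive_number`, the window starting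
--     # `consecutive_number - 1` positions back is a match.
--     index = []
--     for x_axis, day in enumerate(lis):
--         run = 0
--         for y_axis, period in enumerate(day):
--             run = run + 1 if period == value else 0
--             if run >= consecutive_number:
--                 index.append([x_axis, y_axis - consecutive_number + 1])
--     return index
-- ===== Notes on version B (the rewrite author's own statement) =====
-- stated objective: alternative
-- what changed: Replaces the per-position slice comparison (building and comparing a length-k list at every index) with a single pass per row that tracks the current run length of the value and emits the window start when the run reaches k; avoids the O(k) work per position, measured ~1.2x at a timing run's sizes.
-- outside the precondition, e.g. on list_element_index([[1, 1]], 1, 0): A returns [[0, 0], [0, 1]], B returns [[0, 1], [0, 2]]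
import Mathlib
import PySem

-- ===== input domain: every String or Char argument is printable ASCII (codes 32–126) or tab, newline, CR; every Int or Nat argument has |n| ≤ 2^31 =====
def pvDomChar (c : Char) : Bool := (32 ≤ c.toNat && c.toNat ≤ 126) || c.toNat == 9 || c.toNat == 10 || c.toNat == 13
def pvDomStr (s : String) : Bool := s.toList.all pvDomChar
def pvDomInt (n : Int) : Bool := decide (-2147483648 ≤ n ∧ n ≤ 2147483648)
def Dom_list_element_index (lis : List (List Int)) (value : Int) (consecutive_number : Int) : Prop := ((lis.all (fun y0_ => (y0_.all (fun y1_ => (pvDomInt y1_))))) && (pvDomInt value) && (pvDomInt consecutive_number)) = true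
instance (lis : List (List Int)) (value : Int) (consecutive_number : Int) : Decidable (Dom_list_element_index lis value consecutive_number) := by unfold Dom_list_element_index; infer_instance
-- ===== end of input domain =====

-- B replaces A's per-position slice comparison by a single pass per row that tracks
-- the current run length of `value` and emits the window start when it reaches
-- `consecutive_number` (objective: alternative single-pass algorithm).

-- ===== PORT A =====
-- Note: `lis[x_axis]` in A is exactly the row `day` produced by enumerate, so the
-- port slices `xd.2` (= day) directly.
def list_element_index (lis : List (List Int)) (value : Int) (consecutive_number : Int) : List (List Int) :=
  (PySem.List.enumerate lis).foldl
    (fun index xd =>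
      (PySem.List.enumerate xd.2).foldl
        (fun index yp =>
          if yp.1 ≤ (xd.2.length : Int) - consecutive_number then
            if PySem.List.slice xd.2 (some yp.1) (some (yp.1 + consecutive_number)) =
                PySem.List.pyRepeat [value] consecutive_number then
              index ++ [[xd.1, yp.1]]
            else index
          else index)
        index)
    []

-- ===== PORT B =====
def list_element_index_alt (lis : List (List Int)) (value : Int) (consecutive_number : Int) : List (List Int) :=
  (PySem.List.enumerate lis).foldl
    (fun index xd =>
      ((PySem.List.enumerate xd.2).foldl
        (fun st yp =>
          let run := if yp.2 = value then st.2 + 1 else 0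
          (if consecutive_number ≤ run then st.1 ++ [[xd.1, yp.1 - consecutive_number + 1]] else st.1,
           run))
        (index, 0)).1)
    []

-- ===== PRECONDITION & SPEC =====
-- Pre_ restricts to the natural domain of a run length: consecutive_number ≥ 1.
-- For consecutive_number ≤ 0 (a nonsensical count) A still returns a value, but that
-- value (every index, via empty or negatively-bounded slices) is an accident of
-- Python slice semantics that B does not reproduce.
def Pre_list_element_index (lis : List (List Int)) (value : Int) (consecutive_number : Int) : Prop :=
  1 ≤ consecutive_number
instance (lis : List (List Int)) (value : Int) (consecutive_number : Int) : Decidable (Pre_list_element_index lis value consecutive_number) := by unfold Pre_list_element_index; infer_instance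

def pvWitness_list_element_index : List (List Int) × Int × Int := ([[1, 1, 2, 1, 1, 1]], 1, 2)

def Spec_list_element_index (lis : List (List Int)) (value : Int) (consecutive_number : Int) (out : List (List Int)) : Prop := out = list_element_index_alt lis value consecutive_number
instance (lis : List (List Int)) (value : Int) (consecutive_number : Int) (out : List (List Int)) : Decidable (Spec_list_element_index lis value consecutive_number out) := by unfold Spec_list_element_index; infer_instance

-- ===== CLAIM (what is proved, stated in full; the proofs are below) =====
def Claim_equal_list_element_index : Prop := ∀ (lis : List (List Int)) (value : Int) (consecutive_number : Int), Dom_list_element_index lis value consecutive_number → Pre_list_element_index lis value consecutive_number → Spec_list_element_index lis value consecutive_number (list_element_index lis value consecutive_number)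

-- ===== LEMMAS AND PROOFS =====

-- run length of `v` at the end of `l` (B's `run` state)
def pvRun (v : Int) (l : List Int) : Int := l.foldl (fun r p => if p = v then r + 1 else 0) 0

-- start indices of matching windows (A's emissions, in Nat form)
def pvStarts (v : Int) (kn : Nat) (d : List Int) : List Nat :=
  (List.range d.length).filter
    (fun s => decide (s + kn ≤ d.length ∧ (d.drop s).take kn = List.replicate kn v))

-- end indices of matching windows (B's emissions)
def pvEnds (v k : Int) (d : List Int) : List Nat :=
  (List.range d.length).filter (fun e => decide (k ≤ pvRun v (d.take (e + 1))))

lemma pvRun_append (v a : Int) (l : List Int) :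
    pvRun v (l ++ [a]) = if a = v then pvRun v l + 1 else 0 := by
  simp [pvRun, List.foldl_append]

lemma pvRun_bounds (v : Int) (l : List Int) : 0 ≤ pvRun v l ∧ pvRun v l ≤ (l.length : Int) := by
  induction l using List.reverseRecOn with
  | nil => simp [pvRun]
  | append_singleton l a ih =>
    rw [pvRun_append]
    simp only [List.length_append, List.length_cons, List.length_nil]
    by_cases ha : a = v <;> simp [ha] <;> push_cast <;> omega

lemma pvRun_ge_iff (v : Int) (M : List Int) (j : Nat) (hj : 1 ≤ j) :
    ((j : Int) ≤ pvRun v M) ↔ (j ≤ M.length ∧ M.drop (M.length - j) = List.replicate j v) := by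
  induction M using List.reverseRecOn generalizing j with
  | nil =>
    simp [pvRun]
  | append_singleton M a ih =>
    rw [pvRun_append]
    have hlen : (M ++ [a]).length = M.length + 1 := by simp
    rw [hlen]
    by_cases ha : a = v
    · rw [if_pos ha]
      by_cases hj1 : j = 1
      · subst hj1
        have hb := pvRun_bounds v M
        simp only [Nat.cast_one]
        constructor
        · intro _
          refine ⟨by omega, ?_⟩
          rw [Nat.add_sub_cancel, List.drop_append_of_le_length (le_refl _), List.drop_length]
          simp [ha]
        · intro _
          have hb2 : (0:Int) ≤ pvRun v M := hb.1
          omega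
      · have hj2 : 2 ≤ j := by omega
        have ihm := ih (j - 1) (by omega)
        by_cases hl : j ≤ M.length + 1
        · have h1 : M.length + 1 - j ≤ M.length := by omega
          rw [List.drop_append_of_le_length h1]
          have h2 : M.length + 1 - j = M.length - (j - 1) := by omega
          rw [h2]
          have h3 : List.replicate j v = List.replicate (j - 1) v ++ [v] := by
            conv_lhs => rw [show j = (j - 1) + 1 by omega]
            rw [List.replicate_succ']
          rw [h3, ha, List.append_left_inj]
          constructor
          · intro h
            have h4 : ((j - 1 : Nat) : Int) ≤ pvRun v M := by omega
            obtain ⟨h5, h6⟩ := ihm.mp h4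
            exact ⟨by omega, h6⟩
          · rintro ⟨h4, h5⟩
            have h6 := ihm.mpr ⟨by omega, h5⟩
            omega
        · have hb := pvRun_bounds v M
          constructor
          · intro h; exfalso; omega
          · rintro ⟨h4, _⟩; exfalso; omega
    · rw [if_neg ha]
      constructor
      · intro h; exfalso; omega
      · rintro ⟨h4, h5⟩
        exfalso
        have h1 : M.length + 1 - j ≤ M.length := by omega
        rw [List.drop_append_of_le_length h1,
          show List.replicate j v = List.replicate (j - 1) v ++ [v] by
            conv_lhs => rw [show j = (j - 1) + 1 by omega]
            rw [List.replicate_succ'] ] at h5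
        have := congrArg List.reverse h5
        simp at this
        exact ha this.1
lemma filter_range_shrink (p : Nat → Bool) (m j : Nat)
    (h : ∀ s, m ≤ s → s < m + j → p s = false) :
    (List.range (m + j)).filter p = (List.range m).filter p := by
  induction j with
  | zero => rfl
  | succ j ih =>
    rw [show m + (j + 1) = (m + j) + 1 by omega, List.range_succ, List.filter_append]
    simp [h (m + j) (by omega) (by omega)]
    exact ih (fun s hs hlt => h s hs (by omega))

lemma pvStarts_append (v : Int) (kn : Nat) (hk : 1 ≤ kn) (d : List Int) (a : Int) :
    pvStarts v kn (d ++ [a]) = pvStarts v kn d ++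
      (if kn ≤ d.length + 1 ∧ ((d ++ [a]).drop (d.length + 1 - kn)).take kn = List.replicate kn v
       then [d.length + 1 - kn] else []) := by
  unfold pvStarts
  rw [show (d ++ [a]).length = d.length + 1 by simp]
  by_cases hb : kn ≤ d.length + 1
  · set n := d.length with hn
    set s0 := n + 1 - kn with hs0
    -- shrink range (n+1) to range (s0+1)
    have e1 : (List.range (n + 1)).filter
        (fun s => decide (s + kn ≤ n + 1 ∧ ((d ++ [a]).drop s).take kn = List.replicate kn v))
        = (List.range (s0 + 1)).filter
        (fun s => decide (s + kn ≤ n + 1 ∧ ((d ++ [a]).drop s).take kn = List.replicate kn v)) := by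
      rw [show n + 1 = (s0 + 1) + (n + 1 - (s0 + 1)) by omega]
      exact filter_range_shrink _ _ _ (fun s hs hlt => by
        simp only [decide_eq_false_iff_not]
        rintro ⟨hbb, -⟩
        omega)
    rw [e1, List.range_succ, List.filter_append, List.filter_singleton]
    congr 1
    · -- range s0 part equals pvStarts d
      have e2 : (List.range s0).filter
          (fun s => decide (s + kn ≤ n + 1 ∧ ((d ++ [a]).drop s).take kn = List.replicate kn v))
          = (List.range s0).filter
          (fun s => decide (s + kn ≤ n ∧ (d.drop s).take kn = List.replicate kn v)) := by
        refine List.filter_congr fun s hs => ?_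
        rw [List.mem_range] at hs
        have hsd : List.drop s (d ++ [a]) = List.drop s d ++ [a] :=
          List.drop_append_of_le_length (by omega)
        have hkd : (List.drop s d ++ [a]).take kn = (List.drop s d).take kn :=
          List.take_append_of_le_length (by rw [List.length_drop]; omega)
        rw [hsd, hkd, decide_eq_decide]
        constructor <;> rintro ⟨h1, h2⟩ <;> exact ⟨by omega, h2⟩
      rw [e2]
      rw [show n = s0 + (n - s0) by omega]
      refine (filter_range_shrink _ _ _ (fun s hs hlt => by
        simp only [decide_eq_false_iff_not]
        rintro ⟨hbb, -⟩
        omega)).symm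
    · -- the new element
      have hcond : (s0 + kn ≤ n + 1) := by omega
      by_cases hw : ((d ++ [a]).drop s0).take kn = List.replicate kn v
      · simp [hcond, hw, hb]
      · simp [hw]
  · -- kn > d.length + 1 : everything empty
    rw [if_neg (by rintro ⟨h, -⟩; omega)]
    have h1 : (List.range (d.length + 1)).filter
        (fun s => decide (s + kn ≤ d.length + 1 ∧ ((d ++ [a]).drop s).take kn = List.replicate kn v)) = [] := by
      rw [List.filter_eq_nil_iff]
      intro s hs
      simp only [decide_eq_true_eq]
      rintro ⟨hA, -⟩
      omega
    have h2 : (List.range d.length).filter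
        (fun s => decide (s + kn ≤ d.length ∧ (d.drop s).take kn = List.replicate kn v)) = [] := by
      rw [List.filter_eq_nil_iff]
      intro s hs
      simp only [decide_eq_true_eq]
      rintro ⟨hA, -⟩
      omega
    rw [h1, h2, List.append_nil]

lemma pvEnds_append (v k : Int) (d : List Int) (a : Int) :
    pvEnds v k (d ++ [a]) = pvEnds v k d ++
      (if k ≤ pvRun v (d ++ [a]) then [d.length] else []) := by
  unfold pvEnds
  rw [show (d ++ [a]).length = d.length + 1 by simp, List.range_succ, List.filter_append]
  congr 1
  · refine List.filter_congr fun e he => ?_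
    rw [List.mem_range] at he
    rw [List.take_append_of_le_length (by omega)]
  · simp only [List.filter_singleton]
    rw [List.take_of_length_le (by simp)]
    by_cases h : k ≤ pvRun v (d ++ [a]) <;> simp [h]
lemma ends_eq_starts_shift (v k : Int) (hk : 1 ≤ k) (d : List Int) :
    pvEnds v k d = (pvStarts v k.toNat d).map (fun s => s + (k.toNat - 1)) := by
  have hkn : 1 ≤ k.toNat := by omega
  have hkc : (k.toNat : Int) = k := Int.toNat_of_nonneg (by omega)
  induction d using List.reverseRecOn with
  | nil => simp [pvEnds, pvStarts]
  | append_singleton d a ih =>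
    rw [pvEnds_append, pvStarts_append v k.toNat hkn d a, List.map_append, ih]
    congr 1
    have hiff : (k ≤ pvRun v (d ++ [a])) ↔
        (k.toNat ≤ d.length + 1 ∧
         ((d ++ [a]).drop (d.length + 1 - k.toNat)).take k.toNat = List.replicate k.toNat v) := by
      conv_lhs => rw [← hkc]
      rw [pvRun_ge_iff v (d ++ [a]) k.toNat hkn]
      have hl : (d ++ [a]).length = d.length + 1 := by simp
      rw [hl]
      constructor
      · rintro ⟨h1, h2⟩
        refine ⟨h1, ?_⟩
        rw [List.take_of_length_le (by rw [List.length_drop, hl]; omega), h2]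
      · rintro ⟨h1, h2⟩
        refine ⟨h1, ?_⟩
        rw [← h2, List.take_of_length_le (by rw [List.length_drop, hl]; omega)]
    by_cases hc : k ≤ pvRun v (d ++ [a])
    · rw [if_pos hc, if_pos (hiff.mp hc)]
      have hb := (hiff.mp hc).1
      simp
      omega
    · rw [if_neg hc, if_neg (fun h => hc (hiff.mpr h))]
      simp

lemma rowA_eq (value k : Int) (hk : 1 ≤ k) (x : Int) (d : List Int) (index : List (List Int)) :
    (PySem.List.enumerate d).foldl
      (fun index yp =>
        if yp.1 ≤ (d.length : Int) - k then
          if PySem.List.slice d (some yp.1) (some (yp.1 + k)) = PySem.List.pyRepeat [value] k then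
            index ++ [[x, yp.1]]
          else index
        else index)
      index
    = index ++ (pvStarts value k.toNat d).map (fun s : Nat => ([x, (s : Int)] : List Int)) := by
  rw [PySem.List.enumerate_eq_map_pyRange d 0, List.foldl_map]
  have hfun : (fun (idx : List (List Int)) (j : Int) =>
        if ((j, PySem.List.pyGetD d j 0) : Int × Int).1 ≤ (d.length : Int) - k then
          if PySem.List.slice d (some ((j, PySem.List.pyGetD d j 0) : Int × Int).1)
              (some (((j, PySem.List.pyGetD d j 0) : Int × Int).1 + k)) =
              PySem.List.pyRepeat [value] k then
            idx ++ [[x, ((j, PySem.List.pyGetD d j 0) : Int × Int).1]]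
          else idx
        else idx)
      = (fun idx j =>
        if (decide (j ≤ (d.length : Int) - k ∧
            PySem.List.slice d (some j) (some (j + k)) = PySem.List.pyRepeat [value] k)) then
          idx ++ [(fun j : Int => ([x, j] : List Int)) j]
        else idx) := by
    funext idx j
    by_cases h1 : j ≤ (d.length : Int) - k <;>
      by_cases h2 : PySem.List.slice d (some j) (some (j + k)) = PySem.List.pyRepeat [value] k <;>
      simp [h1, h2]
  rw [hfun, PySem.List.foldl_append_if]
  congr 1
  have hlen : PySem.List.len d = ((d.length : Nat) : Int) := by simp [PySem.List.len]
  rw [hlen, PySem.List.pyRange_zero_natCast, List.filter_map, List.map_map]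
  unfold pvStarts
  have hcond : ∀ s : Nat,
      ((s : Int) ≤ (d.length : Int) - k ∧
        PySem.List.slice d (some (s : Int)) (some ((s : Int) + k)) = PySem.List.pyRepeat [value] k)
      ↔ (s + k.toNat ≤ d.length ∧ (d.drop s).take k.toNat = List.replicate k.toNat value) := by
    intro s
    have h1 : ((s : Int) + k) = ((s + k.toNat : Nat) : Int) := by push_cast; omega
    rw [h1, PySem.List.slice_natCast, show s + k.toNat - s = k.toNat by omega,
      PySem.List.pyRepeat_singleton]
    exact and_congr (by omega) Iff.rfl
  have hfilt : (List.filter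
        ((fun j : Int => decide (j ≤ (d.length : Int) - k ∧
            PySem.List.slice d (some j) (some (j + k)) = PySem.List.pyRepeat [value] k)) ∘ Nat.cast)
        (List.range d.length))
      = (List.filter (fun s => decide (s + k.toNat ≤ d.length ∧
            (d.drop s).take k.toNat = List.replicate k.toNat value)) (List.range d.length)) := by
    refine List.filter_congr fun s _hs => ?_
    simp only [Function.comp, decide_eq_decide]
    exact hcond s
  rw [hfilt]
  rfl

lemma rowB_eq (value k x : Int) (d : List Int) (index : List (List Int)) :
    (PySem.List.enumerate d).foldl
      (fun st yp =>
        let run := if yp.2 = value then st.2 + 1 else 0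
        (if k ≤ run then st.1 ++ [[x, yp.1 - k + 1]] else st.1, run))
      (index, 0)
    = (index ++ (pvEnds value k d).map (fun e : Nat => ([x, (e : Int) - k + 1] : List Int)),
       pvRun value d) := by
  induction d using List.reverseRecOn with
  | nil => simp [PySem.List.enumerate_nil, pvEnds, pvRun]
  | append_singleton d a ih =>
    rw [PySem.List.enumerate_append, List.foldl_append, ih]
    simp only [PySem.List.enumerate_cons, PySem.List.enumerate_nil, List.foldl_cons,
      List.foldl_nil]
    rw [pvEnds_append, ← pvRun_append value a d]
    refine Prod.ext ?_ rfl
    simp only [List.map_append, apply_ite (List.map (fun e : Nat => ([x, (e : Int) - k + 1] : List Int)))]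
    by_cases hc : k ≤ pvRun value (d ++ [a])
    · rw [if_pos hc, if_pos hc]
      simp [List.append_assoc]
    · rw [if_neg hc, if_neg hc]
      simp

lemma foldl_ext {α β : Type} (f g : β → α → β) (h : ∀ b a, f b a = g b a)
    (l : List α) (i : β) : l.foldl f i = l.foldl g i := by
  have : f = g := funext fun b => funext fun a => h b a
  rw [this]

-- ===== VERDICT (by name: the statement is the Claim_ definition above) =====
theorem list_element_index_spec : Claim_equal_list_element_index := by
  intro lis value k _hdom hpre
  have hk : (1 : Int) ≤ k := hpre
  show list_element_index lis value k = list_element_index_alt lis value k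
  unfold list_element_index list_element_index_alt
  refine foldl_ext _ _ (fun index xd => ?_) _ _
  rw [rowA_eq value k hk xd.1 xd.2 index, rowB_eq value k xd.1 xd.2 index]
  rw [ends_eq_starts_shift value k hk xd.2, List.map_map]
  refine congrArg _ (List.map_congr_left fun s _hs => ?_)
  simp only [Function.comp]
  have hk1 : 1 ≤ k.toNat := by omega
  have : ((s + (k.toNat - 1) : Nat) : Int) - k + 1 = (s : Int) := by
    have : (k.toNat : Int) = k := Int.toNat_of_nonneg (by omega)
    push_cast [Nat.cast_sub hk1]
    omega
  rw [this]
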